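-- pv_equiv track=rewrite | github.com/eulersformula/Lintcode-LeetCode | Min_Deletions_To_Obtain_String_in_Right_Format.py | min_deletions_to_obtain_string_in_right_format
-- ===== SOURCE A (Python) =====
-- def min_deletions_to_obtain_string_in_right_format(s: str) -> int:
--     # write your code here
--     # Questions to ask:
--     # 1. Can s be empty? If so, what should be returned?
--     if len(s) <= 1:
--         return 0
--     num_A, num_B = 0, 0
--     for v in s:
--         if v == 'A':
--             num_A += 1
--         else:
--             num_B += 1
--     if num_A == 0 or num_B == 0:
--         return 0
--     idx = 0 # either last A or first B
--     num_A_r, num_B_l = num_A, 0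
--     res = None
--     while idx < len(s):
--         if s[idx] == 'A':
--             num_A_r -= 1
--         cur_res = num_A_r + num_B_l
--         if res is None or cur_res < res:
--             res = cur_res
--         if s[idx] == 'B':
--             num_B_l += 1
--         idx += 1
--     return res
-- ===== SOURCE B (Python) =====
-- def min_deletions_to_obtain_string_in_right_format(s: str) -> int:
--     # Single-pass DP: res = current minimum deletions, b_count = 'B's seen so far.
--     res = 0
--     b_count = 0
--     for c in s:
--         if c == 'A':
--             res = min(res + 1, b_count)
--         elif c == 'B':
--             b_count += 1
--     return res
-- ===== Notes on version B (the rewrite author's own statement) =====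
-- stated objective: simpler
-- what changed: A counts both letters in a first pass, guards three special cases, then scans every split point with a running (remaining-count, left-count, optional result) state; B is a single one-pass DP that keeps the running minimum directly via res = min(res + 1, b_count), with no precomputed totals, no None result and no special-case guards.
import Mathlib
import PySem

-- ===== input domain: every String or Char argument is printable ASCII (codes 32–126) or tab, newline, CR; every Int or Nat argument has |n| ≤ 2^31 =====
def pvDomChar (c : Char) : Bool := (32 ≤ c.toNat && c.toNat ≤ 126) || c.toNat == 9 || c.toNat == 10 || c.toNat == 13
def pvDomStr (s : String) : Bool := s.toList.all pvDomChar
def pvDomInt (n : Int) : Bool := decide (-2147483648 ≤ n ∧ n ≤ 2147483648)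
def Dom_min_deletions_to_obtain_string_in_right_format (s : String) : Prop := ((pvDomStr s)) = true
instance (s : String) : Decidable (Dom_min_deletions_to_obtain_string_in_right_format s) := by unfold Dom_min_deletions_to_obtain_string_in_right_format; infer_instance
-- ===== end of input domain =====

-- B replaces A's count-pass + split-point scan by a single-pass DP recurrence (simpler, one loop, no precomputed totals).

-- ===== PORT A =====
-- the `for v in s` counting loop
def pvCountAB : List Char → Int × Int → Int × Int
  | [], acc => acc
  | c :: t, (nA, nB) => pvCountAB t (if c = 'A' then (nA + 1, nB) else (nA, nB + 1))

-- the `while idx < len(s)` loop, step for step (res : Option Int mirrors Python's None)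
def pvWhileA : List Char → Int → Int → Option Int → Option Int
  | [], _, _, res => res
  | c :: t, numAr, numBl, res =>
    let numAr := if c = 'A' then numAr - 1 else numAr
    let cur := numAr + numBl
    let res : Option Int :=
      match res with
      | none => some cur
      | some r => if cur < r then some cur else some r
    pvWhileA t numAr (if c = 'B' then numBl + 1 else numBl) res

def min_deletions_to_obtain_string_in_right_format (s : String) : Int :=
  let cs := s.toList
  if cs.length ≤ 1 then 0
  else
    let (numA, numB) := pvCountAB cs (0, 0)
    if numA = 0 ∨ numB = 0 then 0
    else
      match pvWhileA cs numA 0 none with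
      | some r => r
      | none => 0  -- unreachable: the while loop runs at least once here (len(s) ≥ 2), so res is an int

-- ===== PORT B =====
def pvFoldB : List Char → Int → Int → Int
  | [], res, _ => res
  | c :: t, res, bCount =>
    if c = 'A' then pvFoldB t (min (res + 1) bCount) bCount
    else if c = 'B' then pvFoldB t res (bCount + 1)
    else pvFoldB t res bCount

def min_deletions_to_obtain_string_in_right_format_alt (s : String) : Int :=
  pvFoldB s.toList 0 0

-- ===== PRECONDITION & SPEC =====
def Spec_min_deletions_to_obtain_string_in_right_format (s : String) (out : Int) : Prop := out = min_deletions_to_obtain_string_in_right_format_alt s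
instance (s : String) (out : Int) : Decidable (Spec_min_deletions_to_obtain_string_in_right_format s out) := by unfold Spec_min_deletions_to_obtain_string_in_right_format; infer_instance

-- ===== CLAIM (what is proved, stated in full; the proofs are below) =====
def Claim_equal_min_deletions_to_obtain_string_in_right_format : Prop := ∀ (s : String), Dom_min_deletions_to_obtain_string_in_right_format s → Spec_min_deletions_to_obtain_string_in_right_format s (min_deletions_to_obtain_string_in_right_format s)

-- ===== LEMMAS AND PROOFS =====

-- number of 'A' characters, as an Int
def pvCA : List Char → Int
  | [] => 0
  | c :: t => (if c = 'A' then 1 else 0) + pvCA t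

-- number of non-'A' characters, as an Int
def pvCN : List Char → Int
  | [] => 0
  | c :: t => (if c = 'A' then 0 else 1) + pvCN t

lemma pvCA_nonneg (l : List Char) : 0 ≤ pvCA l := by
  induction l with
  | nil => simp [pvCA]
  | cons c t ih => simp only [pvCA]; split <;> omega

lemma pvCountAB_eq (l : List Char) (a b : Int) :
    pvCountAB l (a, b) = (a + pvCA l, b + pvCN l) := by
  induction l generalizing a b with
  | nil => simp [pvCountAB, pvCA, pvCN]
  | cons c t ih =>
    simp only [pvCountAB, pvCA, pvCN]
    split <;> rw [ih] <;> ring_nf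

-- simulation invariant: A's running optimum exceeds B's by the number of 'A's still ahead
lemma pvWhileA_sim (t : List Char) (r b : Int) (hrb : r ≤ b) :
    pvWhileA t (pvCA t) b (some (r + pvCA t)) = some (pvFoldB t r b) := by
  induction t generalizing r b with
  | nil => simp [pvWhileA, pvFoldB, pvCA]
  | cons c u ih =>
    by_cases hA : c = 'A'
    · subst hA
      simp only [pvWhileA, pvFoldB, pvCA, Char.reduceEq, reduceIte]
      have h2 : (if (1 : Int) + pvCA u - 1 + b < r + (1 + pvCA u) then some ((1 : Int) + pvCA u - 1 + b)
            else some (r + (1 + pvCA u))) = some (min (r + 1) b + pvCA u) := by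
        split <;> simp_all
        all_goals omega
      rw [h2, show (1 : Int) + pvCA u - 1 = pvCA u from by ring,
        ih (min (r + 1) b) b (by omega)]
    · by_cases hB : c = 'B'
      · subst hB
        simp only [pvWhileA, pvFoldB, pvCA, Char.reduceEq, reduceIte]
        have h2 : (if (0 : Int) + pvCA u + b < r + (0 + pvCA u) then some ((0 : Int) + pvCA u + b)
              else some (r + (0 + pvCA u))) = some (r + pvCA u) := by
          split <;> simp_all
          all_goals omega
        rw [h2, show (0 : Int) + pvCA u = pvCA u from by ring, ih r (b + 1) (by omega)]
      · simp only [pvWhileA, pvFoldB, pvCA, if_neg hA, if_neg hB]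
        have h2 : (if (0 : Int) + pvCA u + b < r + (0 + pvCA u) then some ((0 : Int) + pvCA u + b)
              else some (r + (0 + pvCA u))) = some (r + pvCA u) := by
          split <;> simp_all
          all_goals omega
        rw [h2, show (0 : Int) + pvCA u = pvCA u from by ring, ih r b hrb]

-- the first loop iteration turns res = None into the first candidate
lemma pvWhileA_full (c : Char) (t : List Char) :
    pvWhileA (c :: t) (pvCA (c :: t)) 0 none = some (pvFoldB (c :: t) 0 0) := by
  by_cases hA : c = 'A'
  · subst hA
    simp only [pvWhileA, pvFoldB, pvCA, Char.reduceEq, reduceIte]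
    norm_num
    have h := pvWhileA_sim t 0 0 le_rfl
    norm_num at h
    exact h
  · by_cases hB : c = 'B'
    · subst hB
      simp only [pvWhileA, pvFoldB, pvCA, Char.reduceEq, reduceIte]
      have := pvWhileA_sim t 0 1 (by omega)
      simpa using this
    · simp only [pvWhileA, pvFoldB, pvCA, if_neg hA, if_neg hB]
      have := pvWhileA_sim t 0 0 le_rfl
      simpa using this

-- if there is no 'A', B's res is never touched
lemma pvFoldB_noA (t : List Char) (r b : Int) (h : pvCA t = 0) : pvFoldB t r b = r := by
  induction t generalizing b with
  | nil => simp [pvFoldB]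
  | cons c u ih =>
    have hcau : 0 ≤ pvCA u := pvCA_nonneg u
    simp only [pvCA] at h
    by_cases hA : c = 'A'
    · simp [hA] at h; omega
    · simp only [pvFoldB, if_neg hA]
      split
      · exact ih _ (by simp only [if_neg hA] at h; omega)
      · exact ih _ (by simp only [if_neg hA] at h; omega)

-- if every character is 'A', b_count stays 0 and res stays 0
lemma pvFoldB_allA (t : List Char) (h : pvCN t = 0) : pvFoldB t 0 0 = 0 := by
  induction t with
  | nil => simp [pvFoldB]
  | cons c u ih =>
    have : 0 ≤ pvCN u := by
      clear ih h; induction u with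
      | nil => simp [pvCN]
      | cons d v ihv => simp only [pvCN]; split <;> omega
    simp only [pvCN] at h
    by_cases hA : c = 'A'
    · simp only [pvFoldB, if_pos hA]
      have : min (0 + 1 : Int) 0 = 0 := by omega
      rw [this]
      exact ih (by simp [hA] at h; omega)
    · simp [hA] at h; omega

-- ===== VERDICT (by name: the statement is the Claim_ definition above) =====
theorem min_deletions_to_obtain_string_in_right_format_spec : Claim_equal_min_deletions_to_obtain_string_in_right_format := by
  intro s _
  unfold Spec_min_deletions_to_obtain_string_in_right_format
  unfold min_deletions_to_obtain_string_in_right_format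
  unfold min_deletions_to_obtain_string_in_right_format_alt
  simp only [pvCountAB_eq]
  cases hcs : s.toList with
  | nil => simp [pvFoldB]
  | cons c t =>
    by_cases hlen : (c :: t).length ≤ 1
    · -- single character: both sides give 0
      have ht : t = [] := by
        cases t with
        | nil => rfl
        | cons d u => simp at hlen
      subst ht
      simp only [if_pos hlen]
      by_cases hA : c = 'A'
      · simp [pvFoldB, hA]
      · simp [pvFoldB, hA]
    · simp only [if_neg hlen]
      by_cases hz : (0 : Int) + pvCA (c :: t) = 0 ∨ (0 : Int) + pvCN (c :: t) = 0
      · rw [if_pos hz]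
        rcases hz with hz | hz
        · exact (pvFoldB_noA (c :: t) 0 0 (by omega)).symm
        · exact (pvFoldB_allA (c :: t) (by omega)).symm
      · rw [if_neg hz]
        have h0 : (0 : Int) + pvCA (c :: t) = pvCA (c :: t) := by ring
        rw [h0, pvWhileA_full c t]
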